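-- pv_equiv track=rewrite | github.com/nicepyprod/csv-surgeon | csv_surgeon/fill.py | fill_backward
-- ===== SOURCE A (Python) =====
-- from typing import Iterable, Iterator
--
-- def fill_backward(
--     rows: Iterable[dict],
--     column: str,
-- ) -> Iterator[dict]:
--     """Backward-fill empty values in *column* from the next non-empty value."""
--     collected = list(rows)
--     last: str = ""
--     for row in reversed(collected):
--         if column in row and row[column].strip() == "":
--             row[column] = last
--         elif column in row:
--             last = row[column]
--     yield from collected
-- ===== SOURCE B (Python) =====
-- from typing import Iterable, Iterator
--
-- def fill_backward(
--     rows: Iterable[dict],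
--     column: str,
-- ) -> Iterator[dict]:
--     """Backward-fill empty values in *column*, one forward pass with a pending buffer."""
--     pending = []  # buffered rows: empty-in-column rows and column-less rows between them
--     for row in rows:
--         if column in row:
--             if row[column].strip() == "":
--                 pending.append(row)
--             else:
--                 value = row[column]
--                 for p in pending:
--                     if column in p:
--                         p[column] = value
--                 yield from pending
--                 pending = []
--                 yield row
--         else:
--             pending.append(row)
--     for p in pending:
--         if column in p:
--             p[column] = ""
--     yield from pending
-- ===== Notes on version B (the rewrite author's own statement) =====
-- stated objective: alternative
-- what changed: Replaces the materialize-then-reverse-scan (carrying the next non-empty value backward) with a single forward streaming pass that buffers rows whose column value is empty or absent and flushes them, filled, when the next non-empty value arrives (or with "" at the end).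
import Mathlib
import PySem

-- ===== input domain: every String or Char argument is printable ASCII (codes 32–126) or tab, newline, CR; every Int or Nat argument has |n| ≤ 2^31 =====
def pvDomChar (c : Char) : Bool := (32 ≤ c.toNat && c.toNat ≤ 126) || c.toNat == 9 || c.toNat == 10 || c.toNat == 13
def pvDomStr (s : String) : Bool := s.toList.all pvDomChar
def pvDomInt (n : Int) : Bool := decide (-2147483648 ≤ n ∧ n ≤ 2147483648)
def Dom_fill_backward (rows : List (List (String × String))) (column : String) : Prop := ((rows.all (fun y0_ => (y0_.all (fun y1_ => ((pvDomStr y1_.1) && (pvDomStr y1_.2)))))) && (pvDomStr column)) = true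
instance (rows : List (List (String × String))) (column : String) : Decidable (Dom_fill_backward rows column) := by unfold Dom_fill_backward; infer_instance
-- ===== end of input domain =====

-- B replaces A's reverse scan by a forward pass with a pending buffer; both Pythons mutate the
-- input row dicts in place identically, the equivalence proved here is about the yielded rows.

-- ===== PORT A =====
-- one step of A's loop over reversed(collected); state = (last, rows processed so far, original order)
def aStep (column : String) (st : String × List (PySem.Dict String String))
    (row : PySem.Dict String String) : String × List (PySem.Dict String String) :=
  if row.contains column && (PySem.Str.strip (row.getD column "") == "") then
    (st.1, row.insert column st.1 :: st.2)
  else if row.contains column then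
    (row.getD column "", row :: st.2)
  else
    (st.1, row :: st.2)

def fill_backward (rows : List (List (String × String))) (column : String) :
    List (List (String × String)) :=
  let collected := rows.map PySem.Dict.mk
  ((collected.reverse.foldl (aStep column) ("", [])).2).map PySem.Dict.items

-- ===== PORT B =====
-- fill a buffered row's column (only buffered rows that HAVE the column were empty there)
def bFill (column v : String) (row : PySem.Dict String String) : PySem.Dict String String :=
  if row.contains column then row.insert column v else row

-- forward pass: buffer rows whose column is empty/absent, flush on the next non-empty value
def bGo (column : String) (pending : List (PySem.Dict String String)) :
    List (PySem.Dict String String) → List (PySem.Dict String String)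
  | [] => pending.map (bFill column "")
  | row :: rest =>
    if row.contains column then
      if PySem.Str.strip (row.getD column "") == "" then
        bGo column (pending ++ [row]) rest
      else
        pending.map (bFill column (row.getD column "")) ++ row :: bGo column [] rest
    else
      bGo column (pending ++ [row]) rest

def fill_backward_alt (rows : List (List (String × String))) (column : String) :
    List (List (String × String)) :=
  (bGo column [] (rows.map PySem.Dict.mk)).map PySem.Dict.items

-- ===== PRECONDITION & SPEC =====
def Spec_fill_backward (rows : List (List (String × String))) (column : String) (out : List (List (String × String))) : Prop := out = fill_backward_alt rows column
instance (rows : List (List (String × String))) (column : String) (out : List (List (String × String))) : Decidable (Spec_fill_backward rows column out) := by unfold Spec_fill_backward; infer_instance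

-- ===== CLAIM (what is proved, stated in full; the proofs are below) =====
def Claim_equal_fill_backward : Prop := ∀ (rows : List (List (String × String))) (column : String), Dom_fill_backward rows column → Spec_fill_backward rows column (fill_backward rows column)

-- ===== LEMMAS AND PROOFS =====

-- invariant: B's forward pass with buffer `pending` equals the buffer filled with A's final
-- `last` value for this suffix, followed by A's processed suffix
theorem bGo_eq (column : String) (rows pending : List (PySem.Dict String String)) :
    bGo column pending rows =
      pending.map (bFill column (rows.reverse.foldl (aStep column) ("", [])).1) ++
        (rows.reverse.foldl (aStep column) ("", [])).2 := by
  induction rows generalizing pending with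
  | nil => simp [bGo]
  | cons r rest ih =>
    rw [List.reverse_cons, List.foldl_append]
    by_cases hc : r.contains column
    · by_cases he : PySem.Str.strip (r.getD column "") == ""
      · simp only [bGo, hc, he, if_true, ih]
        simp [aStep, hc, he, List.map_append, bFill]
      · simp only [bGo, hc, he, if_true, ih]
        simp [aStep, hc, he]
    · simp only [bGo, hc, ih]
      simp [aStep, hc, List.map_append, bFill]

-- ===== VERDICT (by name: the statement is the Claim_ definition above) =====
theorem fill_backward_spec : Claim_equal_fill_backward := by
  intro rows column _
  unfold Spec_fill_backward fill_backward fill_backward_alt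
  rw [bGo_eq]
  simp
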